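-- pv_equiv track=rewrite | github.com/ashlrai/ashlr-ao | ashlr_ao/status.py | _extract_question
-- ===== SOURCE A (Python) =====
-- def _extract_question(lines: list[str]) -> str:
--     """Extract the agent's question from recent output lines."""
--     # Look backwards for question-like content
--     question_lines = []
--     for line in reversed(lines):
--         stripped = line.strip()
--         if not stripped:
--             if question_lines:
--                 break
--             continue
--         question_lines.insert(0, stripped)
--         if len(question_lines) >= 3:
--             break
--     return "\n".join(question_lines) if question_lines else "Agent needs your input"
-- ===== SOURCE B (Python) =====
-- def _extract_question(lines: list[str]) -> str:
--     """Extract the agent's question from recent output lines."""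
--     stripped = [line.strip() for line in lines]
--     i = len(stripped)
--     while i > 0 and not stripped[i - 1]:
--         i -= 1
--     j = i
--     while j > 0 and stripped[j - 1]:
--         j -= 1
--     block = stripped[max(j, i - 3):i]
--     return "\n".join(block) if block else "Agent needs your input"
-- ===== Notes on version B (the rewrite author's own statement) =====
-- stated objective: alternative
-- what changed: Replaces the reversed-iteration accumulator loop (insert(0,...) with break conditions) by a strip-all pass plus two backward index scans that find the block boundaries, then one slice of the last 3 block lines.
import Mathlib
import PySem

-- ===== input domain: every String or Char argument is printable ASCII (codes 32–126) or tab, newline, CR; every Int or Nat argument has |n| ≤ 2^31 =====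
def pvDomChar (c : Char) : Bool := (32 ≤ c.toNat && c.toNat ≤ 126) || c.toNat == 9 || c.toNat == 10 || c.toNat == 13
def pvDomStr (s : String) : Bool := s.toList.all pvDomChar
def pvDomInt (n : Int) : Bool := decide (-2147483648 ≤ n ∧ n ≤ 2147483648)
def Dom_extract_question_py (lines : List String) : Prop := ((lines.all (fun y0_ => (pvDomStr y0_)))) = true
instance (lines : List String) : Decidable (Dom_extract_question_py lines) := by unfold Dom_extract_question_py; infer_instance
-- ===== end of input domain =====

-- B replaces A's reversed accumulator loop with break by boundary-index scans plus one slice (alternative decomposition, same cost).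

-- ===== PORT A =====
-- loop 'for line in reversed(lines)' with question_lines accumulator and break
def pvALoop (lines : List String) (acc : List String) : List String :=
  match lines with
  | [] => acc
  | line :: rest =>
    let stripped := PySem.Str.strip line
    if stripped = "" then
      if acc ≠ [] then acc else pvALoop rest acc
    else
      let acc' := stripped :: acc  -- question_lines.insert(0, stripped)
      if 3 ≤ acc'.length then acc' else pvALoop rest acc'

def extract_question_py (lines : List String) : String :=
  let q := pvALoop lines.reverse []
  if q ≠ [] then PySem.Str.join "\n" q else "Agent needs your input"

-- ===== PORT B =====
-- while i > 0 and not stripped[i-1]: i -= 1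
def pvSkipEmpty (st : List String) : Nat → Nat
  | 0 => 0
  | i + 1 => if st.getD i "" = "" then pvSkipEmpty st i else i + 1

-- while j > 0 and stripped[j-1]: j -= 1
def pvSkipNonEmpty (st : List String) : Nat → Nat
  | 0 => 0
  | j + 1 => if st.getD j "" ≠ "" then pvSkipNonEmpty st j else j + 1

def extract_question_py_alt (lines : List String) : String :=
  let st := lines.map PySem.Str.strip
  let i := pvSkipEmpty st st.length
  let j := pvSkipNonEmpty st i
  let block := PySem.List.slice st (some (max (j : Int) ((i : Int) - 3))) (some (i : Int))
  if block ≠ [] then PySem.Str.join "\n" block else "Agent needs your input"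

-- ===== PRECONDITION & SPEC =====
def Spec_extract_question_py (lines : List String) (out : String) : Prop := out = extract_question_py_alt lines
instance (lines : List String) (out : String) : Decidable (Spec_extract_question_py lines out) := by unfold Spec_extract_question_py; infer_instance

-- ===== CLAIM (what is proved, stated in full; the proofs are below) =====
def Claim_equal_extract_question_py : Prop := ∀ (lines : List String), Dom_extract_question_py lines → Spec_extract_question_py lines (extract_question_py lines)

-- ===== LEMMAS AND PROOFS =====

-- the common characterisation: last ≤3 stripped lines of the trailing non-empty block, in order
def pvCore (st : List String) : List String :=
  ((((st.reverse).dropWhile (· == "")).takeWhile (fun s => !(s == ""))).take 3).reverse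

theorem pvALoop_phase2 (ls : List String) :
    ∀ acc : List String, acc ≠ [] → acc.length < 3 →
    pvALoop ls acc =
      (((ls.map PySem.Str.strip).takeWhile (fun s => !(s == ""))).take (3 - acc.length)).reverse ++ acc := by
  induction ls with
  | nil => intro acc h1 h2; simp [pvALoop]
  | cons l rest ih =>
    intro acc h1 h2
    simp only [pvALoop, List.map_cons]
    by_cases hs : PySem.Str.strip l = ""
    · simp [hs, h1]
    · simp only [hs, List.takeWhile_cons]
      have hbs : (PySem.Str.strip l == "") = false := by simpa using hs
      simp only [hbs, Bool.not_false, if_true]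
      by_cases h3 : 3 ≤ (PySem.Str.strip l :: acc).length
      · have : acc.length = 2 := by simp at h3 h2 ⊢; omega
        simp [this]
      · rw [if_neg h3]
        rw [ih (PySem.Str.strip l :: acc) (by simp)
          (by simp only [List.length_cons] at h3 ⊢; omega)]
        have hlen : acc.length ≤ 2 := by omega
        have h31 : 3 - acc.length = (3 - (PySem.Str.strip l :: acc).length) + 1 := by
          simp; omega
        rw [h31, List.take_succ_cons]
        simp

theorem pvALoop_eq_core (ls : List String) :
    pvALoop ls [] =
      (((((ls.map PySem.Str.strip).dropWhile (· == ""))).takeWhile (fun s => !(s == ""))).take 3).reverse := by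
  induction ls with
  | nil => simp [pvALoop]
  | cons l rest ih =>
    simp only [pvALoop, List.map_cons]
    by_cases hs : PySem.Str.strip l = ""
    · simp only [hs]
      simp only [ne_eq, not_true_eq_false, if_false]  -- acc = [] so first branch recurses
      simpa [hs] using ih
    · have hbs : (PySem.Str.strip l == "") = false := by simpa using hs
      simp only [if_neg hs, List.dropWhile_cons, hbs]
      have : ¬ (3 ≤ (PySem.Str.strip l :: ([] : List String)).length) := by simp
      rw [if_neg this]
      rw [pvALoop_phase2 rest (PySem.Str.strip l :: []) (by simp) (by simp)]
      simp [hbs]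

theorem pvSkipEmpty_eq (st : List String) :
    ∀ i : Nat, i ≤ st.length →
      pvSkipEmpty st i = (((st.take i).reverse).dropWhile (· == "")).length := by
  intro i
  induction i with
  | zero => simp [pvSkipEmpty]
  | succ i ih =>
    intro hi
    have hlt : i < st.length := by omega
    have htake : st.take (i + 1) = st.take i ++ [st[i]] := by
      rw [List.take_add_one]; simp [List.getElem?_eq_getElem hlt]
    have hgd : st.getD i "" = st[i] := List.getD_eq_getElem st "" hlt
    simp only [pvSkipEmpty, hgd, htake, List.reverse_append, List.reverse_singleton,
      List.singleton_append, List.dropWhile_cons]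
    by_cases h : st[i] = ""
    · simp only [h]
      simpa using ih (by omega)
    · have hb : (st[i] == "") = false := by simpa using h
      simp [h, hb]
      omega

theorem pvSkipNonEmpty_eq (st : List String) :
    ∀ i : Nat, i ≤ st.length →
      pvSkipNonEmpty st i = (((st.take i).reverse).dropWhile (fun s => !(s == ""))).length := by
  intro i
  induction i with
  | zero => simp [pvSkipNonEmpty]
  | succ i ih =>
    intro hi
    have hlt : i < st.length := by omega
    have htake : st.take (i + 1) = st.take i ++ [st[i]] := by
      rw [List.take_add_one]; simp [List.getElem?_eq_getElem hlt]
    have hgd : st.getD i "" = st[i] := List.getD_eq_getElem st "" hlt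
    simp only [pvSkipNonEmpty, hgd, htake, List.reverse_append, List.reverse_singleton,
      List.singleton_append, List.dropWhile_cons]
    by_cases h : st[i] = ""
    · simp [h]
      omega
    · have hb : (st[i] == "") = false := by simpa using h
      simp only [ne_eq, h, not_false_eq_true, if_true, hb, Bool.not_false]
      exact ih (by omega)

theorem pv_block_eq_core (st : List String) :
    PySem.List.slice st
      (some (max ((pvSkipNonEmpty st (pvSkipEmpty st st.length) : Nat) : Int)
                 ((pvSkipEmpty st st.length : Int) - 3)))
      (some ((pvSkipEmpty st st.length : Nat) : Int)) = pvCore st := by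
  set i := pvSkipEmpty st st.length with hi_def
  set j := pvSkipNonEmpty st i with hj_def
  have hi : i = ((st.reverse).dropWhile (· == "")).length := by
    rw [hi_def, pvSkipEmpty_eq st st.length le_rfl, List.take_length]
  set d := (st.reverse).dropWhile (· == "") with hd_def
  have hile : i ≤ st.length := by
    rw [hi]
    calc d.length ≤ st.reverse.length := by rw [hd_def]; exact List.length_dropWhile_le _ _
    _ = st.length := List.length_reverse
  have hu : st.take i = d.reverse := by
    have hsuf : d <:+ st.reverse := by rw [hd_def]; exact List.dropWhile_suffix _
    have hpre : d.reverse <+: st := by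
      have h3 : d.reverse <+: st.reverse.reverse := List.reverse_prefix.mpr hsuf
      simpa only [List.reverse_reverse] using h3
    have := List.prefix_iff_eq_take.mp hpre
    rw [this, List.length_reverse, ← hi]
  have hj : j = (d.dropWhile (fun s => !(s == ""))).length := by
    rw [hj_def, pvSkipNonEmpty_eq st i hile, hu, List.reverse_reverse]
  have hdlen : d.length = i := by rw [hi]
  have hji : j ≤ i := by
    rw [hj, ← hdlen]; exact List.length_dropWhile_le _ _
  set t := d.takeWhile (fun s => !(s == "")) with ht_def
  have htlen : t.length = i - j := by
    have : t.length + (d.dropWhile (fun s => !(s == ""))).length = d.length := by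
      rw [← List.length_append, ht_def, List.takeWhile_append_dropWhile]
    omega
  have ht3 : t.take 3 = d.take (min 3 (i - j)) := by
    have hpre : t <+: d := by rw [ht_def]; exact List.takeWhile_prefix _
    rw [List.prefix_iff_eq_take.mp hpre, List.take_take, htlen]
  set k := min 3 (i - j) with hk_def
  have hmax : (max (j : Int) ((i : Int) - 3)) = ((max j (i - 3) : Nat) : Int) := by
    omega
  have hmk : max j (i - 3) = i - k := by omega
  rw [hmax, PySem.List.slice_natCast, ← List.drop_take, hmk, hu]
  unfold pvCore
  rw [← hd_def, ← ht_def, ht3]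
  rw [List.reverse_take, hdlen]

-- ===== VERDICT (by name: the statement is the Claim_ definition above) =====
theorem extract_question_py_spec : Claim_equal_extract_question_py := by
  intro lines _
  unfold Spec_extract_question_py
  have hA : pvALoop lines.reverse [] = pvCore (lines.map PySem.Str.strip) := by
    rw [pvALoop_eq_core]
    unfold pvCore
    rw [List.map_reverse]
  have hB := pv_block_eq_core (lines.map PySem.Str.strip)
  simp only [extract_question_py, extract_question_py_alt]
  rw [hA, hB]
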